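-- pv_equiv track=rewrite | github.com/timgl/django-clickhouse | src/django_clickhouse/utils.py | int_ranges
-- ===== SOURCE A (Python) =====
-- from typing import Union, Any, Optional, TypeVar, Set, Dict, Iterable, Tuple, Iterator, Callable, List
--
-- def int_ranges(items: Iterable[int]) -> Iterator[Tuple[int, int]]:
--     """
--     Finds continuous intervals in integer iterable.
--     :param items: Items to search in
--     :return: Iterator over Tuple[start, end]
--     """
--     interval_start = None
--     prev_item = None
--     for item in sorted(items):
--         if prev_item is None:
--             interval_start = prev_item = item
--         elif prev_item + 1 == item:
--             prev_item = item
--         else: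
--             interval = interval_start, prev_item
--             interval_start = prev_item = item
--             yield interval
--
--     if interval_start is None:
--         raise StopIteration()
--     else:
--         yield interval_start, prev_item
-- ===== SOURCE B (Python) =====
-- import itertools
--
-- def int_ranges(items):
--     """
--     Finds continuous intervals in integer iterable.
--     :param items: Items to search in
--     :return: Iterator over Tuple[start, end]
--     """
--     s = sorted(items)
--     for _, grp in itertools.groupby(enumerate(s), key=lambda iv: iv[1] - iv[0]):
--         g = list(grp)
--         yield g[0][1], g[-1][1]
-- ===== Notes on version B (the rewrite author's own statement) =====
-- stated objective: idiomatic
-- what changed: Replaced the hand-rolled interval_start/prev_item state machine by the standard itertools.groupby-on-(value minus index) idiom over enumerate(sorted(items)), yielding each group's first and last value.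
-- outside the precondition, e.g. on int_ranges([]): A raises RuntimeError, B returns []
import Mathlib
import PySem

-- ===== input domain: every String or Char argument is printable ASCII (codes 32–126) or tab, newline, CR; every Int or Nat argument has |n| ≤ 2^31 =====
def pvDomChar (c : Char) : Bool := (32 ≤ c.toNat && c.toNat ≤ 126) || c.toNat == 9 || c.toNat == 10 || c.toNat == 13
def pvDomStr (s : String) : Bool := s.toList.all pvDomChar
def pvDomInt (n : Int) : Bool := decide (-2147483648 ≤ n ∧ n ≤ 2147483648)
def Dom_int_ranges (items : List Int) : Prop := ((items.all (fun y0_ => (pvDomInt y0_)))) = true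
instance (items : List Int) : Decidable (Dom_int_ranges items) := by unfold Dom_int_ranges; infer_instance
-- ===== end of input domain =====

-- B replaces A's hand-rolled state machine by the idiomatic enumerate/groupby-on-(value−index) run detection;
-- both Pythons are generators: equivalence is about the list of yielded values. A raises on empty input
-- (StopIteration inside a generator → RuntimeError), B yields nothing there (see Raises_ block).

-- ===== PORT A =====
-- state = (interval_start, prev_item, yielded-so-far), both Options as in the Python
def int_ranges_step (st : Option Int × Option Int × List (Int × Int)) (item : Int) :
    Option Int × Option Int × List (Int × Int) :=
  match st with
  | (is, prev, acc) =>
    match prev with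
    | none => (some item, some item, acc)
    | some p =>
      if p + 1 == item then (is, some item, acc)
      else (some item, some item, acc ++ [(is.getD 0, p)])  -- getD 0 unreachable: prev ≠ none → is ≠ none

def int_ranges (items : List Int) : List (Int × Int) :=
  match (PySem.List.sorted items id).foldl int_ranges_step (none, none, []) with
  | (none, _, acc) => acc            -- interval_start is None: Python raises; excluded by Pre_
  | (some is, prev, acc) => acc ++ [(is, prev.getD 0)]

-- ===== PORT B =====
-- itertools.groupby(enumerate(s), key=λ iv, iv.2 - iv.1): group consecutive entries with equal key
def groupRuns : List (Int × Int) → List (List (Int × Int))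
  | [] => []
  | x :: xs =>
    match groupRuns xs with
    | [] => [[x]]
    | [] :: gs => [x] :: gs          -- unreachable: groups are nonempty
    | (y :: g) :: gs =>
      if x.2 - x.1 == y.2 - y.1 then (x :: y :: g) :: gs else [x] :: (y :: g) :: gs

def int_ranges_alt (items : List Int) : List (Int × Int) :=
  let s := PySem.List.sorted items id
  (groupRuns (PySem.List.enumerate s)).map fun g => ((g.headD (0, 0)).2, (g.getLastD (0, 0)).2)

-- ===== PRECONDITION & SPEC =====
-- Pre_ excludes only the empty input, on which the Python A raises (StopIteration → RuntimeError).
def Pre_int_ranges (items : List Int) : Prop := items ≠ []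
instance (items : List Int) : Decidable (Pre_int_ranges items) := by unfold Pre_int_ranges; infer_instance
def pvWitness_int_ranges : List Int := [3, 1, 2, 7]

def Spec_int_ranges (items : List Int) (out : List (Int × Int)) : Prop := out = int_ranges_alt items
instance (items : List Int) (out : List (Int × Int)) : Decidable (Spec_int_ranges items out) := by unfold Spec_int_ranges; infer_instance

-- ===== CLAIM (what is proved, stated in full; the proofs are below) =====
def Claim_equal_int_ranges : Prop := ∀ (items : List Int), Dom_int_ranges items → Pre_int_ranges items → Spec_int_ranges items (int_ranges items)

-- ===== LEMMAS AND PROOFS =====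

-- common reference: runs start prev rest = the list of intervals both programs produce
def runs (s p : Int) : List Int → List (Int × Int)
  | [] => [(s, p)]
  | x :: xs => if p + 1 = x then runs s x xs else (s, p) :: runs x x xs

-- A's fold with a live interval equals acc ++ runs
theorem foldA_runs (t : List Int) (is p : Int) (acc : List (Int × Int)) :
    (match t.foldl int_ranges_step (some is, some p, acc) with
     | (none, _, a) => a
     | (some i, pr, a) => a ++ [(i, pr.getD 0)]) = acc ++ runs is p t := by
  induction t generalizing is p acc with
  | nil => simp [runs]
  | cons x t ih =>
    simp only [List.foldl_cons, int_ranges_step, runs]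
    by_cases h : p + 1 = x
    · simp [h, ih]
    · simp [h, ih]

-- every groupRuns of a cons starts with a group headed by that element
theorem groupRuns_cons_shape (x : Int × Int) (l : List (Int × Int)) :
    ∃ g gs, groupRuns (x :: l) = (x :: g) :: gs := by
  cases l with
  | nil => exact ⟨[], [], rfl⟩
  | cons y ys =>
    obtain ⟨g, gs, h⟩ := groupRuns_cons_shape y ys
    by_cases hk : x.2 - x.1 = y.2 - y.1
    · refine ⟨y :: g, gs, ?_⟩
      conv_lhs => rw [groupRuns]
      rw [h]; simp [hk]
    · refine ⟨[], (y :: g) :: gs, ?_⟩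
      conv_lhs => rw [groupRuns]
      rw [h]; simp [hk]

-- runs with a different start: only the first pair's fst changes
theorem runs_shape (l : List Int) (p : Int) :
    ∃ e rest, ∀ a, runs a p l = (a, e) :: rest := by
  induction l generalizing p with
  | nil => exact ⟨p, [], fun a => rfl⟩
  | cons x xs ih =>
    by_cases h : p + 1 = x
    · obtain ⟨e, rest, hr⟩ := ih x
      exact ⟨e, rest, fun a => by simp [runs, h, hr]⟩
    · obtain ⟨e, rest, hr⟩ := ih x
      exact ⟨p, runs x x xs, fun a => by simp [runs, h]⟩

-- B's group-map on the enumeration equals runs, for any starting index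
theorem groupRuns_cons_cons (x y : Int × Int) (l g : List (Int × Int)) (gs : List (List (Int × Int)))
    (hg : groupRuns (y :: l) = (y :: g) :: gs) :
    groupRuns (x :: y :: l) = if x.2 - x.1 = y.2 - y.1 then (x :: y :: g) :: gs else [x] :: (y :: g) :: gs := by
  conv_lhs => rw [groupRuns]
  rw [hg]
  simp

theorem groupB_runs (t : List Int) (i h : Int) :
    (groupRuns (PySem.List.enumerate (h :: t) i)).map
      (fun g => ((g.headD (0, 0)).2, (g.getLastD (0, 0)).2)) = runs h h t := by
  induction t generalizing i h with
  | nil => simp [PySem.List.enumerate_cons, PySem.List.enumerate_nil, groupRuns, runs]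
  | cons x t ih =>
    have hx := ih (i + 1) x
    rw [PySem.List.enumerate_cons] at hx
    rw [PySem.List.enumerate_cons, PySem.List.enumerate_cons]
    obtain ⟨g, gs, hg⟩ := groupRuns_cons_shape (i + 1, x) (PySem.List.enumerate t (i + 1 + 1))
    rw [groupRuns_cons_cons _ _ _ _ _ hg]
    rw [hg] at hx
    by_cases hpx : h + 1 = x
    · rw [if_pos (by simp; omega)]
      obtain ⟨e, rest, hr⟩ := runs_shape t x
      rw [hr x] at hx
      simp only [List.map_cons, List.headD_cons, List.cons.injEq, Prod.mk.injEq] at hx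
      obtain ⟨⟨-, hlast⟩, hmap⟩ := hx
      rw [runs, if_pos hpx, hr h]
      simp only [List.map_cons, List.headD_cons, List.cons.injEq, Prod.mk.injEq]
      refine ⟨⟨trivial, ?_⟩, hmap⟩
      rw [show ((i, h) :: (i + 1, x) :: g).getLastD (0, 0) = ((i + 1, x) :: g).getLastD (0, 0) by simp]
      exact hlast
    · rw [if_neg (by simp; omega)]
      rw [runs, if_neg hpx, List.map_cons, hx]
      rfl

theorem sorted_ne_nil (items : List Int) (h : items ≠ []) :
    PySem.List.sorted items id ≠ [] := by
  intro hs
  have := PySem.List.sorted_perm (xs := items) (key := id) (rev := false)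
  rw [hs] at this
  exact h this.symm.eq_nil

-- ===== VERDICT (by name: the statement is the Claim_ definition above) =====
theorem int_ranges_spec : Claim_equal_int_ranges := by
  intro items _ hpre
  unfold Spec_int_ranges int_ranges int_ranges_alt
  cases hs : PySem.List.sorted items id with
  | nil => exact absurd hs (sorted_ne_nil items hpre)
  | cons h t =>
    rw [show (h :: t).foldl int_ranges_step (none, none, []) =
        t.foldl int_ranges_step (some h, some h, []) from rfl]
    rw [foldA_runs t h h []]
    simpa using (groupB_runs t 0 h).symm
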